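-- pv_equiv track=rewrite | github.com/josecolella/PTC-Practicas | descargar_imdb.py | processActorsWorkedWith
-- ===== SOURCE A (Python) =====
-- def processActorsWorkedWith(movieDB):
--     """
--     Función que devuelve cada actor/ actriz con todos
--     los actores/actrices con quien han trabajado
--
--     @return dict Diccionario el la cual todas las personas son llaves
--     y tienen como valor todos los actores/actrices
--     """
--     actorsWorkedWith = {}
--     for i in movieDB.values():
--         for j in i:
--             workedWith = i.difference({j})
--             if j not in actorsWorkedWith:
--                 actorsWorkedWith[j] = workedWith
--             else:
--                 actorsWorkedWith[j].update(workedWith)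
--     return actorsWorkedWith
-- ===== SOURCE B (Python) =====
-- def processActorsWorkedWith(movieDB):
--     """Edge-wise rebuild: walk each cast once keeping a 'seen' prefix and
--     record each unordered co-acting pair incrementally, instead of A's
--     per-actor set-difference-and-merge."""
--     neighbors = {}
--     for cast in movieDB.values():
--         seen = []
--         for a in cast:
--             if a not in neighbors:
--                 neighbors[a] = set()
--             for b in seen:
--                 neighbors[a].add(b)
--                 neighbors[b].add(a)
--             seen.append(a)
--     return neighbors
-- ===== Notes on version B (the rewrite author's own statement) =====
-- stated objective: alternative
-- what changed: B builds the co-actor map edge-wise: it walks each cast once keeping a 'seen' prefix and records each unordered co-acting pair incrementally, instead of A's per-actor set-difference construction and set-merge.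
import Mathlib
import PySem

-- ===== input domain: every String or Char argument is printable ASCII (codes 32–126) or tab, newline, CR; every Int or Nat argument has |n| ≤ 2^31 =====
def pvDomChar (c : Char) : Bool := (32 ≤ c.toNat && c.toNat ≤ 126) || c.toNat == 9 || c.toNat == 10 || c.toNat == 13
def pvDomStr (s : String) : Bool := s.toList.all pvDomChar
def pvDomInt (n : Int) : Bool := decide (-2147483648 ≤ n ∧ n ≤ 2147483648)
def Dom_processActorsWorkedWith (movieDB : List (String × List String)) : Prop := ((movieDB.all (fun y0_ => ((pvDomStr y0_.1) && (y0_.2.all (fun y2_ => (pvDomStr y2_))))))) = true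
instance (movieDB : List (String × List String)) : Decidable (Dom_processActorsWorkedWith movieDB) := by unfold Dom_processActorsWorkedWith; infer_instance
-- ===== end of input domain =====

-- B rebuilds the co-actor map edge-wise (a 'seen' prefix per cast, recording each
-- unordered pair once) instead of A's per-actor set-difference-and-merge; objective:
-- alternative decomposition, same asymptotic cost.

abbrev pvDict := PySem.Dict String (PySem.Set String)

-- ===== PORT A =====
-- one iteration of A's inner loop: j runs over the cast set i
def pvAStep (i : PySem.Set String) (d : pvDict) (j : String) : pvDict :=
  let workedWith := PySem.Set.diff i (PySem.Set.ofList [j])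
  if d.contains j = false then d.insert j workedWith
  else d.modify j PySem.Set.empty (fun s => PySem.Set.update s workedWith)

def processActorsWorkedWith (movieDB : List (String × List String)) : List (String × List String) :=
  ((PySem.Dict.mk movieDB).values.foldl
    (fun d i => i.foldl (pvAStep i) d) PySem.Dict.empty).items

-- ===== PORT B =====
-- inner loop of Source B: for b in seen: neighbors[a].add(b); neighbors[b].add(a)
def pvBInner (a : String) (seen : List String) (d : pvDict) : pvDict :=
  seen.foldl (fun d b =>
    (d.modify a PySem.Set.empty (fun s => PySem.Set.add s b)).modify b
       PySem.Set.empty (fun s => PySem.Set.add s a)) d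

-- body of Source B's 'for a in cast' loop; state = (neighbors, seen)
def pvBStep (st : pvDict × List String) (a : String) : pvDict × List String :=
  let d := if st.1.contains a = false then st.1.insert a PySem.Set.empty else st.1
  (pvBInner a st.2 d, st.2 ++ [a])

def processActorsWorkedWith_alt (movieDB : List (String × List String)) : List (String × List String) :=
  ((PySem.Dict.mk movieDB).values.foldl
    (fun d cast => (cast.foldl pvBStep (d, [])).1) PySem.Dict.empty).items

-- ===== PRECONDITION & SPEC =====
-- Each value of movieDB represents a Python set, so its Lean encoding holds DISTINCT
-- elements; Pre_ states exactly that and excludes no Python input (a Python set cannot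
-- contain duplicates).
def Pre_processActorsWorkedWith (movieDB : List (String × List String)) : Prop :=
  ∀ p ∈ movieDB, p.2.Nodup
instance (movieDB : List (String × List String)) : Decidable (Pre_processActorsWorkedWith movieDB) := by
  unfold Pre_processActorsWorkedWith; infer_instance

def pvWitness_processActorsWorkedWith : (List (String × List String)) :=
  [("m1", ["alice", "bob", "carol"]), ("m2", ["bob", "dan"]), ("m3", ["eve"])]

def Spec_processActorsWorkedWith (movieDB : List (String × List String)) (out : List (String × List String)) : Prop := out = processActorsWorkedWith_alt movieDB
instance (movieDB : List (String × List String)) (out : List (String × List String)) : Decidable (Spec_processActorsWorkedWith movieDB out) := by unfold Spec_processActorsWorkedWith; infer_instance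

-- ===== CLAIM (what is proved, stated in full; the proofs are below) =====
def Claim_equal_processActorsWorkedWith : Prop := ∀ (movieDB : List (String × List String)), Dom_processActorsWorkedWith movieDB → Pre_processActorsWorkedWith movieDB → Spec_processActorsWorkedWith movieDB (processActorsWorkedWith movieDB)

-- ===== LEMMAS AND PROOFS =====

-- the 'if a not in neighbors: neighbors[a] = set()' step never changes any getD … ∅
lemma pvEnsureGetD (d : pvDict) (a k : String) :
    (if d.contains a = false then d.insert a PySem.Set.empty else d).getD k PySem.Set.empty
      = d.getD k PySem.Set.empty := by
  by_cases h : d.contains a = false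
  · rw [if_pos h]
    by_cases hk : k = a
    · subst hk
      rw [PySem.Dict.getD_insert_self, PySem.Dict.getD_of_not_contains d _ h]
    · rw [PySem.Dict.getD_insert_of_ne d _ _ hk]
  · rw [if_neg h]

-- …and its keys become Set.add d.keys a
lemma pvEnsureKeys (d : pvDict) (a : String) :
    (if d.contains a = false then d.insert a PySem.Set.empty else d).keys
      = PySem.Set.add d.keys a := by
  by_cases h : d.contains a = false
  · rw [if_pos h, PySem.Dict.keys_insert_of_not_contains d _ h,
        PySem.Set.add_of_not_mem (fun hm => by
          simp [(PySem.Dict.contains_iff_mem_keys d a).2 hm] at h)]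
  · rw [if_neg h, PySem.Set.add_of_mem ((PySem.Dict.contains_iff_mem_keys d a).1
        (by revert h; cases d.contains a <;> simp))]

lemma pvInnerGetD_other (a k : String) (seen : List String) (d : pvDict)
    (hka : k ≠ a) (hks : k ∉ seen) :
    (pvBInner a seen d).getD k PySem.Set.empty = d.getD k PySem.Set.empty := by
  induction seen generalizing d with
  | nil => rfl
  | cons b seen ih =>
    have hkb : k ≠ b := fun h => hks (h ▸ List.mem_cons_self)
    rw [pvBInner, List.foldl_cons, ← pvBInner,
        ih _ (fun h => hks (List.mem_cons_of_mem _ h)),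
        PySem.Dict.getD_modify_of_ne _ _ _ hkb, PySem.Dict.getD_modify_of_ne _ _ _ hka]

lemma pvInnerGetD_self (a : String) (seen : List String) (d : pvDict) (ha : a ∉ seen) :
    (pvBInner a seen d).getD a PySem.Set.empty
      = PySem.Set.update (d.getD a PySem.Set.empty) seen := by
  induction seen generalizing d with
  | nil => rw [pvBInner, List.foldl_nil, PySem.Set.update_nil]
  | cons b seen ih =>
    have hab : a ≠ b := fun h => ha (h ▸ List.mem_cons_self)
    rw [pvBInner, List.foldl_cons, ← pvBInner,
        ih _ (fun h => ha (List.mem_cons_of_mem _ h)),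
        PySem.Dict.getD_modify_of_ne _ _ _ hab, PySem.Dict.getD_modify_self,
        PySem.Set.update_cons]

lemma pvInnerGetD_seen (a k : String) (seen : List String) (d : pvDict)
    (hnd : seen.Nodup) (ha : a ∉ seen) (hk : k ∈ seen) :
    (pvBInner a seen d).getD k PySem.Set.empty
      = PySem.Set.add (d.getD k PySem.Set.empty) a := by
  induction seen generalizing d with
  | nil => exact absurd hk (List.not_mem_nil)
  | cons b seen ih =>
    have hab : a ≠ b := fun h => ha (by rw [h]; exact List.mem_cons_self)
    have hbs : b ∉ seen := (List.nodup_cons.1 hnd).1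
    rw [pvBInner, List.foldl_cons, ← pvBInner]
    by_cases hkb : k = b
    · subst hkb
      rw [pvInnerGetD_other a k seen _ (fun h => hab h.symm) hbs,
          PySem.Dict.getD_modify_self,
          PySem.Dict.getD_modify_of_ne _ _ _ (fun h => hab h.symm)]
    · have hks : k ∈ seen := (List.mem_cons.1 hk).resolve_left hkb
      rw [ih _ (List.nodup_cons.1 hnd).2 (fun h => ha (List.mem_cons_of_mem _ h)) hks,
          PySem.Dict.getD_modify_of_ne _ _ _ hkb,
          PySem.Dict.getD_modify_of_ne _ _ _
            (fun h => ha (List.mem_cons_of_mem _ (by rw [← h]; exact hks)))]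

lemma pvInnerKeys (a : String) (seen : List String) (d : pvDict)
    (ha : d.contains a = true) (hs : ∀ b ∈ seen, d.contains b = true) :
    (pvBInner a seen d).keys = d.keys := by
  induction seen generalizing d with
  | nil => rfl
  | cons b seen ih =>
    have hb : d.contains b = true := hs b List.mem_cons_self
    rw [pvBInner, List.foldl_cons, ← pvBInner]
    have h1 : (d.modify a PySem.Set.empty (fun s => PySem.Set.add s b)).keys = d.keys := by
      rw [PySem.Dict.keys_modify, PySem.Dict.keys_insert_of_contains _ _ ha]
    have h2 : ((d.modify a PySem.Set.empty (fun s => PySem.Set.add s b)).modify b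
        PySem.Set.empty (fun s => PySem.Set.add s a)).keys = d.keys := by
      rw [PySem.Dict.keys_modify, PySem.Dict.keys_insert_of_contains _ _
        (by rw [PySem.Dict.contains_modify, hb, Bool.or_true]), h1]
    rw [ih _ (by rw [PySem.Dict.contains_modify, PySem.Dict.contains_modify, ha]; simp)
          (fun x hx => by
            rw [PySem.Dict.contains_modify, PySem.Dict.contains_modify,
                hs x (List.mem_cons_of_mem _ hx)]; simp), h2]

lemma pvAKeys (full : PySem.Set String) : ∀ (rest : List String) (d : pvDict),
    (rest.foldl (pvAStep full) d).keys = PySem.Set.update d.keys rest := by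
  intro rest
  induction rest with
  | nil => intro d; rw [List.foldl_nil, PySem.Set.update_nil]
  | cons j rest ih =>
    intro d
    rw [List.foldl_cons, ih, PySem.Set.update_cons]
    congr 1
    unfold pvAStep
    by_cases h : d.contains j = false
    · rw [if_pos h, PySem.Dict.keys_insert_of_not_contains d _ h,
          PySem.Set.add_of_not_mem (fun hm => by
            simp [(PySem.Dict.contains_iff_mem_keys d j).2 hm] at h)]
    · rw [if_neg h, PySem.Dict.keys_modify, PySem.Dict.keys_insert_of_contains _ _
          (by revert h; cases d.contains j <;> simp),
          PySem.Set.add_of_mem ((PySem.Dict.contains_iff_mem_keys d j).1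
            (by revert h; cases d.contains j <;> simp))]

lemma pvAGetD_not_mem (full : PySem.Set String) (k : String) :
    ∀ (rest : List String) (d : pvDict), k ∉ rest →
    (rest.foldl (pvAStep full) d).getD k PySem.Set.empty = d.getD k PySem.Set.empty := by
  intro rest
  induction rest with
  | nil => intro d _; rfl
  | cons j rest ih =>
    intro d hk
    have hkj : k ≠ j := fun h => hk (h ▸ List.mem_cons_self)
    rw [List.foldl_cons, ih _ (fun h => hk (List.mem_cons_of_mem _ h))]
    unfold pvAStep
    by_cases h : d.contains j = false
    · rw [if_pos h, PySem.Dict.getD_insert_of_ne d _ _ hkj]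
    · rw [if_neg h, PySem.Dict.getD_modify_of_ne _ _ _ hkj]

lemma pvAGetD_mem (full : PySem.Set String) (hfull : full.Nodup) (k : String) :
    ∀ (rest : List String) (d : pvDict), rest.Nodup → k ∈ rest →
    (rest.foldl (pvAStep full) d).getD k PySem.Set.empty
      = PySem.Set.update (d.getD k PySem.Set.empty)
          (PySem.Set.diff full (PySem.Set.ofList [k])) := by
  intro rest
  induction rest with
  | nil => intro d _ hk; exact absurd hk (List.not_mem_nil)
  | cons j rest ih =>
    intro d hnd hk
    rw [List.foldl_cons]
    by_cases hkj : k = j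
    · subst hkj
      have hkr : k ∉ rest := (List.nodup_cons.1 hnd).1
      rw [pvAGetD_not_mem full k rest _ hkr]
      unfold pvAStep
      by_cases h : d.contains k = false
      · rw [if_pos h, PySem.Dict.getD_insert_self, PySem.Dict.getD_of_not_contains d _ h]
        show _ = PySem.Set.update [] _
        rw [PySem.Set.update_nil_left,
            PySem.Set.ofList_eq_self_of_nodup _ (PySem.Set.nodup_diff _ _ hfull)]
      · rw [if_neg h, PySem.Dict.getD_modify_self]
    · have hkr : k ∈ rest := (List.mem_cons.1 hk).resolve_left hkj
      rw [ih _ (List.nodup_cons.1 hnd).2 hkr]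
      congr 1
      unfold pvAStep
      by_cases h : d.contains j = false
      · rw [if_pos h, PySem.Dict.getD_insert_of_ne d _ _ hkj]
      · rw [if_neg h, PySem.Dict.getD_modify_of_ne _ _ _ hkj]

lemma pvBKeys : ∀ (rest seen : List String) (d : pvDict),
    (∀ x ∈ seen, d.contains x = true) →
    ((rest.foldl pvBStep (d, seen)).1).keys = PySem.Set.update d.keys rest := by
  intro rest
  induction rest with
  | nil => intro seen d _; rw [List.foldl_nil, PySem.Set.update_nil]
  | cons a rest ih =>
    intro seen d hs
    rw [List.foldl_cons]
    show ((rest.foldl pvBStep (pvBInner a seen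
      (if d.contains a = false then d.insert a PySem.Set.empty else d), seen ++ [a])).1).keys = _
    set d1 := if d.contains a = false then d.insert a PySem.Set.empty else d with hd1
    have hk1 : d1.keys = PySem.Set.add d.keys a := pvEnsureKeys d a
    have hc1 : ∀ x, x ∈ d.keys ∨ x = a → d1.contains x = true := fun x hx =>
      (PySem.Dict.contains_iff_mem_keys d1 x).2 (by
        rw [hk1]; exact (PySem.Set.mem_add _ _ _).2 hx)
    have hca : d1.contains a = true := hc1 a (Or.inr rfl)
    have hcs : ∀ b ∈ seen, d1.contains b = true := fun b hb =>
      hc1 b (Or.inl ((PySem.Dict.contains_iff_mem_keys d b).1 (hs b hb)))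
    have hk2 : (pvBInner a seen d1).keys = d1.keys := pvInnerKeys a seen d1 hca hcs
    rw [ih (seen ++ [a]) _ (fun x hx => by
      rw [(PySem.Dict.contains_iff_mem_keys _ x), hk2, hk1]
      rcases List.mem_append.1 hx with h | h
      · exact (PySem.Set.mem_add _ _ _).2 (Or.inl ((PySem.Dict.contains_iff_mem_keys d x).1 (hs x h)))
      · exact (PySem.Set.mem_add _ _ _).2 (Or.inr (List.mem_singleton.1 h)))]
    rw [hk2, hk1, PySem.Set.update_cons]

lemma pvBGetD (k : String) : ∀ (rest seen : List String) (d : pvDict),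
    (seen ++ rest).Nodup →
    ((rest.foldl pvBStep (d, seen)).1).getD k PySem.Set.empty
      = if k ∈ seen then PySem.Set.update (d.getD k PySem.Set.empty) rest
        else if k ∈ rest then
          PySem.Set.update (d.getD k PySem.Set.empty) (seen ++ rest.erase k)
        else d.getD k PySem.Set.empty := by
  intro rest
  induction rest with
  | nil =>
    intro seen d _
    rw [List.foldl_nil]
    by_cases hks : k ∈ seen
    · rw [if_pos hks, PySem.Set.update_nil]
    · rw [if_neg hks, if_neg (List.not_mem_nil)]
  | cons a rest ih =>
    intro seen d hnd
    have hnd' : ((seen ++ [a]) ++ rest).Nodup := by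
      rw [List.append_assoc, List.singleton_append]; exact hnd
    have hsa : a ∉ seen := by
      intro h
      exact ((List.nodup_append.1 hnd).2.2) a h a List.mem_cons_self rfl
    have hndseen : seen.Nodup := (List.nodup_append.1 hnd).1
    have hconsnd : (a :: rest).Nodup := (List.nodup_append.1 hnd).2.1
    have har : a ∉ rest := (List.nodup_cons.1 hconsnd).1
    rw [List.foldl_cons]
    show ((rest.foldl pvBStep (pvBInner a seen
      (if d.contains a = false then d.insert a PySem.Set.empty else d), seen ++ [a])).1).getD k
        PySem.Set.empty = _
    set d1 := if d.contains a = false then d.insert a PySem.Set.empty else d with hd1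
    have hg1 : ∀ x, d1.getD x PySem.Set.empty = d.getD x PySem.Set.empty :=
      fun x => pvEnsureGetD d a x
    rw [ih (seen ++ [a]) _ hnd']
    by_cases hks : k ∈ seen
    · have hka : k ≠ a := fun h => hsa (h ▸ hks)
      rw [if_pos (List.mem_append.2 (Or.inl hks)), if_pos hks,
          pvInnerGetD_seen a k seen d1 hndseen hsa hks, hg1,
          PySem.Set.update_cons]
    · by_cases hka : k = a
      · subst hka
        rw [if_pos (List.mem_append.2 (Or.inr List.mem_cons_self)),
            pvInnerGetD_self k seen d1 hsa, hg1, ← PySem.Set.update_append,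
            if_neg hks, if_pos List.mem_cons_self, List.erase_cons_head]
      · have hnotseen' : k ∉ seen ++ [a] := fun h => by
          rcases List.mem_append.1 h with h | h
          · exact hks h
          · exact hka (List.mem_singleton.1 h)
        rw [if_neg hnotseen', if_neg hks,
            pvInnerGetD_other a k seen d1 hka hks, hg1]
        by_cases hkr : k ∈ rest
        · rw [if_pos hkr, if_pos (List.mem_cons_of_mem _ hkr),
              List.erase_cons_tail (by simp [Ne.symm hka] : ¬(a == k) = true)]
          rw [List.append_assoc, List.singleton_append]
        · rw [if_neg hkr, if_neg (fun h => by
            rcases List.mem_cons.1 h with h | h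
            · exact hka h
            · exact hkr h)]

lemma pvDiffErase (l : List String) (hl : l.Nodup) (k : String) :
    PySem.Set.diff l (PySem.Set.ofList [k]) = l.erase k := by
  rw [hl.erase_eq_filter]
  show List.filter _ l = _
  apply List.filter_congr
  intro x _
  show (!(PySem.Set.ofList [k]).contains x) = (x != k)
  have : PySem.Set.ofList [k] = [k] := rfl
  rw [this]
  by_cases h : x = k <;> simp [h, bne]

lemma pvMovieEq (i : List String) (hi : i.Nodup) (d : pvDict) (hd : d.keys.Nodup) :
    i.foldl (pvAStep i) d = (i.foldl pvBStep (d, [])).1 := by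
  apply PySem.Dict.ext
  have hAk := pvAKeys i i d
  have hBk := pvBKeys i [] d (by intro x hx; exact absurd hx (List.not_mem_nil))
  have hnodA : (i.foldl (pvAStep i) d).keys.Nodup := by
    rw [hAk]; exact PySem.Set.nodup_update _ _ hd
  have hnodB : ((i.foldl pvBStep (d, [])).1).keys.Nodup := by
    rw [hBk]; exact PySem.Set.nodup_update _ _ hd
  rw [PySem.Dict.items_eq_map_keys _ hnodA PySem.Set.empty,
      PySem.Dict.items_eq_map_keys _ hnodB PySem.Set.empty, hAk, hBk]
  apply List.map_congr_left
  intro k _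
  have hB := pvBGetD k i [] d (by simpa using hi)
  rw [if_neg (List.not_mem_nil)] at hB
  by_cases hki : k ∈ i
  · rw [pvAGetD_mem i hi k i d hi hki, hB, if_pos hki, pvDiffErase i hi k,
        List.nil_append]
  · rw [pvAGetD_not_mem i k i d hki, hB, if_neg hki]

lemma pvFoldEq : ∀ (l : List (String × List String)) (d : pvDict),
    (∀ p ∈ l, p.2.Nodup) → d.keys.Nodup →
    l.foldl (fun d p => p.2.foldl (pvAStep p.2) d) d
      = l.foldl (fun d p => (p.2.foldl pvBStep (d, [])).1) d := by
  intro l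
  induction l with
  | nil => intro d _ _; rfl
  | cons p l ih =>
    intro d hall hd
    rw [List.foldl_cons, List.foldl_cons,
        ← pvMovieEq p.2 (hall p List.mem_cons_self) d hd]
    exact ih _ (fun q hq => hall q (List.mem_cons_of_mem _ hq)) (by
      rw [pvAKeys]; exact PySem.Set.nodup_update _ _ hd)

-- ===== VERDICT (by name: the statement is the Claim_ definition above) =====
theorem processActorsWorkedWith_spec : Claim_equal_processActorsWorkedWith := by
  intro movieDB _ hpre
  unfold Spec_processActorsWorkedWith processActorsWorkedWith processActorsWorkedWith_alt
  rw [PySem.Dict.values_mk, List.foldl_map, List.foldl_map]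
  rw [pvFoldEq movieDB PySem.Dict.empty hpre (by rw [PySem.Dict.keys_empty]; exact List.nodup_nil)]
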